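-- pv_equiv track=rewrite | github.com/mathias-mike/codality-problems | lessons/l004_counting_elements.py | frog_river_crossing_v0
-- ===== SOURCE A (Python) =====
-- def frog_river_crossing_v0(X, A):
--     N = len(A)
--     positions = set()
--
--     for i in range(1, X+1):
--         positions.add(i)
--
--     for i in range(N):
--         if A[i] in positions:
--             positions.remove(A[i])
--
--         if len(positions) == 0:
--             return i
--
--     return -1
-- ===== SOURCE B (Python) =====
-- def frog_river_crossing_v0(X, A):
--     # One pass: record the first time each required position 1..X gets a leaf;
--     # the frog can cross once every position has one, i.e. at the latest of
--     # those first occurrences.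
--     first = {}
--     for i, v in enumerate(A):
--         if 1 <= v <= X and v not in first:
--             first[v] = i
--     if len(first) < X:
--         return -1
--     return max(first.values(), default=0)
-- ===== Notes on version B (the rewrite author's own statement) =====
-- stated objective: faster
-- what changed: A builds the full set {1..X} and mutates it while scanning; B never materializes that set: one pass records the first-occurrence index of each in-range value in a dict and the answer is the maximum of those indices (or -1 if fewer than X positions were seen).
-- intended difference: When X <= 0 and A is empty, A returns -1 only because its scan loop never runs, while B returns 0: with no positions required the frog can cross immediately, which is the intended value. — e.g. on frog_river_crossing_v0(0, []): A returns -1, B returns 0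
import Mathlib
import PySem

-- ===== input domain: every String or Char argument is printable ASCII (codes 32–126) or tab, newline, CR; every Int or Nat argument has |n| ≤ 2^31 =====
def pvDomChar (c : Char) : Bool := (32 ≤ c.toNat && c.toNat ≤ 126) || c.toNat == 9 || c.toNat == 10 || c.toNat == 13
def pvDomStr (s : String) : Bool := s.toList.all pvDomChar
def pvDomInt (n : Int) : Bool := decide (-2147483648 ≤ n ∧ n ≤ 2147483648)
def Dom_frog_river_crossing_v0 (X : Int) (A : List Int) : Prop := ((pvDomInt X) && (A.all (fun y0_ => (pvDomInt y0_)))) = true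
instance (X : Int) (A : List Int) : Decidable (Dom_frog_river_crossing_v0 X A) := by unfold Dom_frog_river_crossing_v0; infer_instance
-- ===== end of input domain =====

-- B replaces A's mutable remaining-positions set by a single first-occurrence pass plus a max; on X ≤ 0 with empty A the two differ (see D_ below).

-- ===== PORT A =====
-- the 'for i in range(N)' loop: removes A[i] from the set if present, returns i once the set is empty
def frogLoopA : List Int → PySem.Set Int → Int → Int
  | [], _, _ => -1
  | a :: rest, pos, i =>
    let pos' := if PySem.Set.contains pos a then (PySem.Set.remove? pos a).getD pos else pos
    if PySem.Set.len pos' = 0 then i else frogLoopA rest pos' (i + 1)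

def frog_river_crossing_v0 (X : Int) (A : List Int) : Int :=
  -- 'for i in range(1, X+1): positions.add(i)': every added value is fresh and ascending,
  -- so the resulting set's element list is exactly list(range(1, X+1)); built directly
  -- (= PySem.Set.ofList (pyRange 1 (X+1) 1), by PySem.Set.ofList_eq_self_of_nodup and
  -- PySem.List.nodup_pyRange_one) because the foldl of Set.add over a large range
  -- cannot be evaluated in list representation.
  let positions : PySem.Set Int := PySem.List.pyRange 1 (X + 1) 1
  frogLoopA A positions 0

-- ===== PORT B =====
-- one step of B's loop: record first occurrence of an in-range value
def bStep (X : Int) (d : PySem.Dict Int Int) (p : Int × Int) : PySem.Dict Int Int :=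
  if 1 ≤ p.2 ∧ p.2 ≤ X ∧ d.contains p.2 = false then d.insert p.2 p.1 else d

def frog_river_crossing_v0_alt (X : Int) (A : List Int) : Int :=
  let first := (PySem.List.enumerate A 0).foldl (bStep X) PySem.Dict.empty
  if (first.size : Int) < X then -1
  else (PySem.List.max? first.values (fun y => y)).getD 0   -- max(first.values(), default=0)

-- ===== PRECONDITION & SPEC =====
-- When X ≤ 0 and A is empty, A returns -1 only because its scan loop never runs, while B
-- returns 0: with no positions required the frog can cross immediately, the intended value.
def D_frog_river_crossing_v0 (X : Int) (A : List Int) : Prop := X ≤ 0 ∧ A = []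
instance (X : Int) (A : List Int) : Decidable (D_frog_river_crossing_v0 X A) := by unfold D_frog_river_crossing_v0; infer_instance

def Spec_frog_river_crossing_v0 (X : Int) (A : List Int) (out : Int) : Prop := ¬ D_frog_river_crossing_v0 X A → out = frog_river_crossing_v0_alt X A
instance (X : Int) (A : List Int) (out : Int) : Decidable (Spec_frog_river_crossing_v0 X A out) := by unfold Spec_frog_river_crossing_v0; infer_instance

def pvDiffWitness_frog_river_crossing_v0 : Int × List Int := (0, [])
def pvDiffWitnessOut_frog_river_crossing_v0 : Int × Int := (-1, 0)

-- ===== CLAIM (what is proved, stated in full; the proofs are below) =====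
def Claim_unchanged_frog_river_crossing_v0 : Prop := ∀ (X : Int) (A : List Int), Dom_frog_river_crossing_v0 X A → Spec_frog_river_crossing_v0 X A (frog_river_crossing_v0 X A)
def Claim_changed_frog_river_crossing_v0 : Prop := Dom_frog_river_crossing_v0 (pvDiffWitness_frog_river_crossing_v0.1) (pvDiffWitness_frog_river_crossing_v0.2) ∧ D_frog_river_crossing_v0 (pvDiffWitness_frog_river_crossing_v0.1) (pvDiffWitness_frog_river_crossing_v0.2) ∧ frog_river_crossing_v0 (pvDiffWitness_frog_river_crossing_v0.1) (pvDiffWitness_frog_river_crossing_v0.2) = pvDiffWitnessOut_frog_river_crossing_v0.1 ∧ frog_river_crossing_v0_alt (pvDiffWitness_frog_river_crossing_v0.1) (pvDiffWitness_frog_river_crossing_v0.2) = pvDiffWitnessOut_frog_river_crossing_v0.2 ∧ pvDiffWitnessOut_frog_river_crossing_v0.1 ≠ pvDiffWitnessOut_frog_river_crossing_v0.2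
def Claim_exact_frog_river_crossing_v0 : Prop := ∀ (X : Int) (A : List Int), Dom_frog_river_crossing_v0 X A → D_frog_river_crossing_v0 X A → frog_river_crossing_v0 X A ≠ frog_river_crossing_v0_alt X A

-- ===== LEMMAS AND PROOFS =====

-- on a duplicate-free set, Python's s.discard(x) is list erase
lemma discard_eq_erase (s : PySem.Set Int) (x : Int) (h : s.Nodup) : PySem.Set.discard s x = s.erase x := by
  rw [List.Nodup.erase_eq_filter h x, PySem.Set.discard]
  apply List.filter_congr
  intro a _
  simp [bne]

-- invariant tying A's remaining-positions set S to B's first-occurrence dict d at loop index i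
def FrogInv (X : Int) (S : List Int) (d : PySem.Dict Int Int) (i : Int) : Prop :=
  (∀ v : Int, v ∈ S ↔ (1 ≤ v ∧ v ≤ X ∧ d.contains v = false)) ∧
  ((S.length : Int) + (d.size : Int) = X) ∧
  (∀ w ∈ d.values, w < i) ∧
  d.keys.Nodup ∧ S ≠ [] ∧ S.Nodup

lemma foldl_max_all (t : List Int) : ∀ (v i : Int), v ≤ i → (∀ w ∈ t, w ≤ i) → (t ++ [i]).foldl max v = i := by
  induction t with
  | nil => intro v i hv _; simpa using hv
  | cons w t ih =>
    intro v i hv hw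
    simp only [List.cons_append, List.foldl_cons]
    exact ih _ i (by simp [hv, hw w (by simp)]) (fun x hx => hw x (by simp [hx]))

lemma max_append_last (vs : List Int) (i : Int) (h : ∀ w ∈ vs, w < i) :
    PySem.List.max? (vs ++ [i]) (fun y => y) = some i := by
  cases vs with
  | nil => simp [PySem.List.max?_id_cons]
  | cons v t =>
    rw [List.cons_append, PySem.List.max?_id_cons]
    rw [foldl_max_all t v i (le_of_lt (h v (by simp))) (fun w hw => le_of_lt (h w (by simp [hw])))]

lemma fold_noop (X : Int) (l : List Int) : ∀ (j : Int) (d : PySem.Dict Int Int),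
    (∀ v : Int, 1 ≤ v → v ≤ X → d.contains v = true) →
    (PySem.List.enumerate l j).foldl (bStep X) d = d := by
  induction l with
  | nil => intro _ _ _; simp [PySem.List.enumerate_nil]
  | cons a rest ih =>
    intro j d hd
    rw [PySem.List.enumerate_cons, List.foldl_cons]
    have hb : bStep X d (j, a) = d := by
      unfold bStep
      by_cases h1 : 1 ≤ a ∧ a ≤ X ∧ d.contains a = false
      · rw [hd a h1.1 h1.2.1] at h1; simp at h1
      · simp [h1]
    rw [hb]; exact ih (j+1) d hd

lemma frog_main (X : Int) (xs : List Int) : ∀ (S : List Int) (d : PySem.Dict Int Int) (i : Int),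
    FrogInv X S d i →
    frogLoopA xs S i =
      (if (((PySem.List.enumerate xs i).foldl (bStep X) d).size : Int) < X then -1
       else (PySem.List.max? ((PySem.List.enumerate xs i).foldl (bStep X) d).values (fun y => y)).getD 0) := by
  induction xs with
  | nil =>
    intro S d i hinv
    obtain ⟨hmem, hlen, hval, hnd, hne, hsnd⟩ := hinv
    have hpos : 0 < S.length := List.length_pos_of_ne_nil hne
    rw [PySem.List.enumerate_nil]
    simp only [List.foldl_nil, frogLoopA]
    rw [if_pos (by omega)]
  | cons a rest ih =>
    intro S d i hinv
    obtain ⟨hmem, hlen, hval, hnd, hne, hsnd⟩ := hinv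
    rw [PySem.List.enumerate_cons, List.foldl_cons]
    by_cases hmemS : a ∈ S
    · -- a is a remaining position: A removes it, B records first occurrence i
      have hcond := (hmem a).mp hmemS
      have hcontS : PySem.Set.contains S a = true := (PySem.Set.contains_iff S a).mpr hmemS
      have hrm : PySem.Set.remove? S a = some (S.erase a) := by
        rw [PySem.Set.remove?_of_mem hmemS, discard_eq_erase S a hsnd]
      have hb : bStep X d (i, a) = d.insert a i := by
        unfold bStep; rw [if_pos (by exact ⟨hcond.1, hcond.2.1, hcond.2.2⟩)]
      rw [hb]
      have hlenerase : (S.erase a).length = S.length - 1 := List.length_erase_of_mem hmemS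
      have hsize : (d.insert a i).size = d.size + 1 := by
        rw [PySem.Dict.size_insert, if_neg (by rw [hcond.2.2]; simp)]
      show (let pos' := if PySem.Set.contains S a then (PySem.Set.remove? S a).getD S else S;
            if PySem.Set.len pos' = 0 then i else frogLoopA rest pos' (i + 1)) = _
      rw [hcontS]; simp only [if_true, hrm, Option.getD_some]
      by_cases hempty : S.erase a = []
      · -- set becomes empty: A returns i; B's dict is now full with max value i
        have hS1 : S.length = 1 := by
          have := hlenerase; rw [hempty] at this; simp at this
          have := List.length_pos_of_ne_nil hne; omega
        have hfull : ∀ v : Int, 1 ≤ v → v ≤ X → (d.insert a i).contains v = true := by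
          intro v h1 h2
          rw [PySem.Dict.contains_insert]
          by_cases hva : v = a
          · simp [hva]
          · have : v ∉ S.erase a := by rw [hempty]; simp
            have hvS : v ∉ S := by
              intro hvS
              exact this ((List.Nodup.mem_erase_iff hsnd).mpr ⟨hva, hvS⟩)
            have := (hmem v).not.mp hvS
            simp only [not_and, Bool.not_eq_false] at this
            simp [this h1 h2]
        rw [fold_noop X rest (i+1) _ hfull]
        have hlenS : PySem.Set.len (S.erase a) = 0 := by rw [hempty]; rfl
        rw [hlenS]; simp only [if_true]
        have hsizeX : ((d.insert a i).size : Int) = X := by rw [hsize]; push_cast; omega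
        rw [if_neg (by omega)]
        have hvals : (d.insert a i).values = d.values ++ [i] := by
          show ((d.insert a i).items.map (·.2)) = _
          rw [PySem.Dict.items_insert_of_not_contains d i hcond.2.2]
          simp [PySem.Dict.values]
        rw [hvals, max_append_last d.values i hval]
        rfl
      · -- set still non-empty: recurse with the updated set/dict
        have hlen0 : ¬ PySem.Set.len (S.erase a) = 0 := by
          have : 0 < (S.erase a).length := List.length_pos_of_ne_nil hempty
          show ¬ ((S.erase a).length : Int) = 0
          omega
        rw [if_neg hlen0]
        apply ih
        refine ⟨?_, ?_, ?_, PySem.Dict.nodup_keys_insert d a i hnd, hempty, List.Nodup.erase a hsnd⟩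
        · intro v
          rw [List.Nodup.mem_erase_iff hsnd, hmem v, PySem.Dict.contains_insert]
          constructor
          · rintro ⟨hva, h1, h2, h3⟩
            refine ⟨h1, h2, ?_⟩
            simp [hva, h3]
          · rintro ⟨h1, h2, h3⟩
            simp only [Bool.or_eq_false_iff, beq_eq_false_iff_ne] at h3
            exact ⟨h3.1, h1, h2, h3.2⟩
        · rw [hlenerase, hsize]
          have : 0 < S.length := List.length_pos_of_ne_nil hne
          push_cast; omega
        · intro w hw
          rcases PySem.Dict.mem_values_insert d a i w hw with h | h
          · omega
          · have := hval w h; omega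
    · -- a is not a remaining position: both sides leave their state unchanged
      have hcontS : PySem.Set.contains S a = false := by
        rw [← Bool.not_eq_true, PySem.Set.contains_iff]; exact hmemS
      have hb : bStep X d (i, a) = d := by
        unfold bStep
        by_cases h1 : 1 ≤ a ∧ a ≤ X ∧ d.contains a = false
        · exact absurd ((hmem a).mpr h1) hmemS
        · simp [h1]
      rw [hb]
      show (let pos' := if PySem.Set.contains S a then (PySem.Set.remove? S a).getD S else S;
            if PySem.Set.len pos' = 0 then i else frogLoopA rest pos' (i + 1)) = _
      rw [hcontS]; simp only [Bool.false_eq_true, if_false]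
      have hlen0 : ¬ PySem.Set.len S = 0 := by
        have : 0 < S.length := List.length_pos_of_ne_nil hne
        show ¬ ((S.length) : Int) = 0
        omega
      rw [if_neg hlen0]
      apply ih
      exact ⟨hmem, hlen, fun w hw => by have := hval w hw; omega, hnd, hne, hsnd⟩

-- ===== VERDICT (by name: the statement is the Claim_ definition above) =====
theorem frog_river_crossing_v0_spec : Claim_unchanged_frog_river_crossing_v0 := by
  intro X A _ hD
  show frog_river_crossing_v0 X A = frog_river_crossing_v0_alt X A
  unfold frog_river_crossing_v0 frog_river_crossing_v0_alt
  by_cases hX : X ≤ 0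
  · cases A with
    | nil => exact absurd ⟨hX, rfl⟩ hD
    | cons a rest =>
      rw [PySem.List.pyRange_one_eq_nil (by omega)]
      rw [fold_noop X _ 0 _ (fun v h1 h2 => absurd (le_trans h1 (le_trans h2 hX)) (by norm_num))]
      simp [frogLoopA, PySem.Set.contains, PySem.Set.len, PySem.Dict.size, PySem.Dict.empty,
            PySem.Dict.values, PySem.List.max?, hX]
  · apply frog_main
    refine ⟨?_, ?_, ?_, ?_, ?_, PySem.List.nodup_pyRange_one 1 (X + 1)⟩
    · intro v
      rw [PySem.List.mem_pyRange_one]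
      simp [PySem.Dict.contains_empty]
    · rw [PySem.List.length_pyRange_one]
      simp [PySem.Dict.size]
      omega
    · intro w hw
      simp [PySem.Dict.values, PySem.Dict.empty] at hw
    · simp [PySem.Dict.keys, PySem.Dict.empty]
    · have : 0 < (PySem.List.pyRange 1 (X + 1) 1).length := by
        rw [PySem.List.length_pyRange_one]; omega
      exact List.ne_nil_of_length_pos this

theorem frog_river_crossing_v0_changed : Claim_changed_frog_river_crossing_v0 := by
  unfold Claim_changed_frog_river_crossing_v0; decide

theorem frog_river_crossing_v0_tight : Claim_exact_frog_river_crossing_v0 := by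
  intro X A _ hD
  obtain ⟨hX, hA⟩ := hD
  subst hA
  have hA' : frog_river_crossing_v0 X [] = -1 := rfl
  rw [hA']
  unfold frog_river_crossing_v0_alt
  simp only [PySem.List.enumerate_nil, List.foldl_nil]
  have : ¬ ((PySem.Dict.size (PySem.Dict.empty : PySem.Dict Int Int)) : Int) < X := by
    simp [PySem.Dict.size, PySem.Dict.empty]; omega
  rw [if_neg this]
  simp [PySem.Dict.values, PySem.Dict.empty, PySem.List.max?]
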